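-- pv_equiv track=rewrite | github.com/qianandfei/UniKDD | BertUtils.py | truncate_lists
-- ===== SOURCE A (Python) =====
-- import copy
--
-- def truncate_lists(ls:list,maxLen:int):
--     ls=copy.deepcopy(ls)#不要破坏原始的
--     assert maxLen>=0
--     sumLen=sum([len(i) for i in ls])
--     while sumLen>maxLen:
--         id=-1#记录最长的那个id
--         nowMaxLen=-1
--         for i in range(len(ls)):
--             if len(ls[i])>=nowMaxLen:#>=优先截短后面的
--                 nowMaxLen=len(ls[i])
--                 id=i
--         ls[id].pop()
--         sumLen-=1
--     return ls
-- ===== SOURCE B (Python) =====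
-- def truncate_lists(ls: list, maxLen: int):
--     # Water-filling: compute the final level L directly (binary search on the
--     # "cost" of capping every list at L) instead of popping one element at a time.
--     def cost(lens, t):
--         return sum(l - t for l in lens if l > t)
--
--     lens = [len(x) for x in ls]
--     total = sum(lens)
--     if total <= maxLen:
--         return [x[:] for x in ls]
--     R = total - maxLen  # number of elements that must be removed
--     # largest L >= 0 with cost(lens, L) >= R
--     lo, hi = 0, max(lens)
--     while lo < hi:
--         mid = (lo + hi + 1) // 2
--         if cost(lens, mid) >= R:
--             lo = mid
--         else:
--             hi = mid - 1
--     L = lo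
--     # every list is capped at L+1; the last `extra` lists reaching level L+1
--     # are capped at L instead (A pops later lists first on ties)
--     extra = R - cost(lens, L + 1)
--     out = []
--     for x in reversed(ls):
--         if len(x) >= L + 1 and extra > 0:
--             out.append(x[:L])
--             extra -= 1
--         else:
--             out.append(x[:min(len(x), L + 1)])
--     out.reverse()
--     return out
-- ===== Notes on version B (the rewrite author's own statement) =====
-- stated objective: faster
-- what changed: Replaces the pop-one-element-per-scan while loop with a water-filling computation: binary search for the final cap level L on list lengths, then build each output list as a single prefix (later lists reaching level L+1 are capped to L first, matching A's tie-breaking).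
import Mathlib
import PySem

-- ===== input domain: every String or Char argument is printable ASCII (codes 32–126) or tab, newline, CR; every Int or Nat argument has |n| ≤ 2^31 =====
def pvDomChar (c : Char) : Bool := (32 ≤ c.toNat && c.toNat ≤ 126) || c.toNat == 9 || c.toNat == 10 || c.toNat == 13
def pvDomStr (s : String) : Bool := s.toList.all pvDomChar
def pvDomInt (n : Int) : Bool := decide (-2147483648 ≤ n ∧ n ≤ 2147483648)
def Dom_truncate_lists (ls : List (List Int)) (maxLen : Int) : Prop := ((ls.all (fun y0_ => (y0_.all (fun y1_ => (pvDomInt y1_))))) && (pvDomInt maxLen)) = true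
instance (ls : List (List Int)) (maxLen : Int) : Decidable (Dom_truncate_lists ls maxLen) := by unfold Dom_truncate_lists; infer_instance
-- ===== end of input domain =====

-- B is faster by a different algorithm: it computes the final water-filling level directly
-- instead of popping one element per full scan. A only reads `ls` (it mutates a deepcopy).

-- ===== PORT A =====
-- the `for i in range(len(ls))` scan: state (id, nowMaxLen); ls[i] is in range for i < len(ls), so getD is exact
def aFindId (ls : List (List Int)) : Int × Int :=
  (List.range ls.length).foldl
    (fun (st : Int × Int) i =>
      if ((ls.getD i []).length : Int) ≥ st.2 then ((i : Int), ((ls.getD i []).length : Int)) else st)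
    (-1, -1)

-- the while loop; `ls[id].pop()` becomes modify/dropLast: under Pre_ (maxLen ≥ 0) the loop only
-- runs when some list is nonempty, so id ≥ 0 and ls[id] ≠ [] there (pop cannot raise)
def truncateLoop (ls : List (List Int)) (sumLen maxLen : Int) : List (List Int) :=
  if sumLen > maxLen then
    truncateLoop (ls.modify (aFindId ls).1.toNat List.dropLast) (sumLen - 1) maxLen
  else ls
termination_by (sumLen - maxLen).toNat
decreasing_by omega

-- deepcopy is the identity on immutable Lean lists
def truncate_lists (ls : List (List Int)) (maxLen : Int) : List (List Int) :=
  truncateLoop ls ((ls.map (fun i => (i.length : Int))).sum) maxLen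

-- ===== PORT B =====
-- cost(lens, t) = sum(l - t for l in lens if l > t)
def bCost (lens : List Int) (t : Int) : Int :=
  ((lens.filter (fun l => decide (l > t))).map (fun l => l - t)).sum

-- the binary-search while loop on (lo, hi)
def bSearch (lens : List Int) (r lo hi : Int) : Int :=
  if lo < hi then
    let mid := PySem.Int.floordiv (lo + hi + 1) 2
    if bCost lens mid ≥ r then bSearch lens r mid hi
    else bSearch lens r lo (mid - 1)
  else lo
termination_by (hi - lo).toNat
decreasing_by
  all_goals
    rw [PySem.Int.floordiv_eq_ediv_of_pos (by omega : (0:Int) < 2)] at *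
    omega

def truncate_lists_alt (ls : List (List Int)) (maxLen : Int) : List (List Int) :=
  let lens := ls.map (fun x => (x.length : Int))
  let total := lens.sum
  if total ≤ maxLen then ls.map (fun x => x)  -- [x[:] for x in ls]: copies are identities here
  else
    let r := total - maxLen
    -- max(lens): lens ≠ [] whenever maxLen ≥ 0 on this branch, so getD 0 is exact there
    let hi := (PySem.List.max? lens (fun l => l)).getD 0
    let L := bSearch lens r 0 hi
    let extra := r - bCost lens (L + 1)
    -- for x in reversed(ls): append x[:L] or x[:min(len(x), L+1)]; then out.reverse()
    ((ls.reverse.foldl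
      (fun (st : List (List Int) × Int) x =>
        if ((x.length : Int) ≥ L + 1) ∧ st.2 > 0 then
          (st.1 ++ [x.take L.toNat], st.2 - 1)   -- x[:L] with L ≥ 0
        else
          (st.1 ++ [x.take (min (x.length : Int) (L + 1)).toNat], st.2))
      ([], extra)).1).reverse

-- ===== PRECONDITION & SPEC =====
-- A asserts maxLen >= 0 and raises AssertionError otherwise; Pre_ excludes exactly that.
def Pre_truncate_lists (ls : List (List Int)) (maxLen : Int) : Prop := 0 ≤ maxLen
instance (ls : List (List Int)) (maxLen : Int) : Decidable (Pre_truncate_lists ls maxLen) := by unfold Pre_truncate_lists; infer_instance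
def pvWitness_truncate_lists : List (List Int) × Int := ([[1, 2, 3], [4, 5]], 3)

def Spec_truncate_lists (ls : List (List Int)) (maxLen : Int) (out : List (List Int)) : Prop := out = truncate_lists_alt ls maxLen
instance (ls : List (List Int)) (maxLen : Int) (out : List (List Int)) : Decidable (Spec_truncate_lists ls maxLen out) := by unfold Spec_truncate_lists; infer_instance

-- ===== CLAIM (what is proved, stated in full; the proofs are below) =====
def Claim_equal_truncate_lists : Prop := ∀ (ls : List (List Int)) (maxLen : Int), Dom_truncate_lists ls maxLen → Pre_truncate_lists ls maxLen → Spec_truncate_lists ls maxLen (truncate_lists ls maxLen)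

-- ===== LEMMAS AND PROOFS =====
-- ---------- proof-layer helpers ----------

-- total length of all inner lists, as an Int
def totalOf (ls : List (List Int)) : Int := (ls.map (fun x => (x.length : Int))).sum

-- right-to-left chopping pass with a countdown counter (the loop of B, recursively)
def chop (L : Int) : Int → List (List Int) → List (List Int) × Int
  | e, [] => ([], e)
  | e, x :: rest =>
    if ((x.length : Int) ≥ L + 1) ∧ e > 0 then
      ((x.take L.toNat) :: (chop L (e - 1) rest).1, (chop L (e - 1) rest).2)
    else
      ((x.take (min (x.length : Int) (L + 1)).toNat) :: (chop L e rest).1, (chop L e rest).2)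

-- ---------- bCost lemmas ----------

theorem bCost_nil (t : Int) : bCost [] t = 0 := rfl

theorem bCost_cons (l t : Int) (lv : List Int) :
    bCost (l :: lv) t = (if t < l then l - t else 0) + bCost lv t := by
  by_cases h : t < l <;> simp [bCost, h]

theorem bCost_append (a b : List Int) (t : Int) :
    bCost (a ++ b) t = bCost a t + bCost b t := by
  induction a with
  | nil => simp [bCost]
  | cons l a ih => rw [List.cons_append, bCost_cons, bCost_cons, ih]; ring

theorem bCost_nonneg (lv : List Int) (t : Int) : 0 ≤ bCost lv t := by
  induction lv with
  | nil => simp [bCost_nil]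
  | cons l lv ih => rw [bCost_cons]; split_ifs with h <;> omega

theorem bCost_zero (lv : List Int) (h : ∀ l ∈ lv, 0 ≤ l) : bCost lv 0 = lv.sum := by
  induction lv with
  | nil => simp [bCost_nil]
  | cons l lv ih =>
    rw [bCost_cons, List.sum_cons, ih (fun x hx => h x (List.mem_cons_of_mem _ hx))]
    have := h l (List.mem_cons_self)
    split_ifs with hc <;> omega

theorem bCost_eq_zero_of_le (lv : List Int) (t : Int) (h : ∀ l ∈ lv, l ≤ t) : bCost lv t = 0 := by
  induction lv with
  | nil => simp [bCost_nil]
  | cons l lv ih =>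
    rw [bCost_cons, ih (fun x hx => h x (List.mem_cons_of_mem _ hx))]
    have := h l (List.mem_cons_self)
    split_ifs with hc <;> omega

theorem all_le_of_bCost_eq_zero (lv : List Int) (t : Int) (h : bCost lv t = 0) :
    ∀ l ∈ lv, l ≤ t := by
  induction lv with
  | nil => simp
  | cons l lv ih =>
    rw [bCost_cons] at h
    have h2 := bCost_nonneg lv t
    intro x hx
    rcases List.mem_cons.mp hx with rfl | hx
    · split_ifs at h with hc <;> omega
    · exact ih (by split_ifs at h with hc <;> omega) x hx

theorem bCost_antitone (lv : List Int) {t t' : Int} (h : t ≤ t') : bCost lv t' ≤ bCost lv t := by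
  induction lv with
  | nil => simp [bCost_nil]
  | cons l lv ih => rw [bCost_cons, bCost_cons]; split_ifs with h1 h2 <;> omega

theorem level_unique (lv : List Int) (r L L' : Int)
    (h1 : r ≤ bCost lv L) (h2 : bCost lv (L + 1) < r)
    (h3 : r ≤ bCost lv L') (h4 : bCost lv (L' + 1) < r) : L = L' := by
  by_contra hne
  rcases lt_or_gt_of_ne hne with h | h
  · have := bCost_antitone lv (show L + 1 ≤ L' by omega); omega
  · have := bCost_antitone lv (show L' + 1 ≤ L by omega); omega

-- ---------- binary search ----------

theorem bSearch_spec (lv : List Int) (r : Int) : ∀ (n : Nat) (lo hi : Int),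
    (hi - lo).toNat = n → lo ≤ hi → r ≤ bCost lv lo →
    lo ≤ bSearch lv r lo hi ∧ bSearch lv r lo hi ≤ hi ∧ r ≤ bCost lv (bSearch lv r lo hi) ∧
      (bSearch lv r lo hi = hi ∨ bCost lv (bSearch lv r lo hi + 1) < r) := by
  intro n
  induction n using Nat.strong_induction_on with
  | _ n ih =>
    intro lo hi hn hle hlo
    rw [bSearch]
    by_cases hlt : lo < hi
    · rw [if_pos hlt]
      have hmid : PySem.Int.floordiv (lo + hi + 1) 2 = (lo + hi + 1) / 2 :=
        PySem.Int.floordiv_eq_ediv_of_pos (by omega)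
      set mid := PySem.Int.floordiv (lo + hi + 1) 2 with hm
      have hb : lo < mid ∧ mid ≤ hi := by rw [hmid]; omega
      by_cases hc : bCost lv mid ≥ r
      · rw [if_pos hc]
        have := ih (hi - mid).toNat (by omega) mid hi rfl (by omega) hc
        exact ⟨by omega, this.2.1, this.2.2.1, this.2.2.2⟩
      · rw [if_neg hc]
        have := ih (mid - 1 - lo).toNat (by omega) lo (mid - 1) rfl (by omega) hlo
        refine ⟨this.1, by omega, this.2.2.1, ?_⟩
        rcases this.2.2.2 with h | h
        · right; rw [h]; simpa using by omega
        · right; exact h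
    · rw [if_neg hlt]
      exact ⟨le_refl _, hle, hlo, by left; omega⟩

-- ---------- fold = chop ----------

theorem fold_eq_chop (L : Int) (xs : List (List Int)) : ∀ (acc : List (List Int)) (e : Int),
    (xs.foldl
      (fun (st : List (List Int) × Int) x =>
        if ((x.length : Int) ≥ L + 1) ∧ st.2 > 0 then
          (st.1 ++ [x.take L.toNat], st.2 - 1)
        else
          (st.1 ++ [x.take (min (x.length : Int) (L + 1)).toNat], st.2))
      (acc, e))
    = (acc ++ (chop L e xs).1, (chop L e xs).2) := by
  induction xs with
  | nil => intro acc e; simp [chop]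
  | cons x xs ih =>
    intro acc e
    rw [List.foldl_cons, chop]
    by_cases h : ((x.length : Int) ≥ L + 1) ∧ e > 0
    · rw [if_pos h, if_pos h, ih]; simp
    · rw [if_neg h, if_neg h, ih]; simp

-- ---------- chop lemmas ----------

theorem chop_append (L e : Int) (a b : List (List Int)) :
    chop L e (a ++ b) =
      ((chop L e a).1 ++ (chop L (chop L e a).2 b).1, (chop L (chop L e a).2 b).2) := by
  induction a generalizing e with
  | nil => simp [chop]
  | cons x a ih =>
    rw [List.cons_append, chop, chop]
    by_cases h : ((x.length : Int) ≥ L + 1) ∧ e > 0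
    · rw [if_pos h, if_pos h, ih]; simp
    · rw [if_neg h, if_neg h, ih]; simp

theorem chop_low (L e : Int) (xs : List (List Int))
    (h : ∀ y ∈ xs, (y.length : Int) < L + 1) : chop L e xs = (xs, e) := by
  induction xs generalizing e with
  | nil => rfl
  | cons x xs ih =>
    have hx := h x List.mem_cons_self
    rw [chop, if_neg (by omega)]
    rw [ih e (fun y hy => h y (List.mem_cons_of_mem _ hy))]
    have : (min (x.length : Int) (L + 1)).toNat = x.length := by omega
    rw [this, List.take_length]

theorem chop_nonpos (L e : Int) (xs : List (List Int)) (he : e ≤ 0)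
    (h : ∀ y ∈ xs, (y.length : Int) ≤ L + 1) : chop L e xs = (xs, e) := by
  induction xs with
  | nil => rfl
  | cons x xs ih =>
    have hx := h x List.mem_cons_self
    rw [chop, if_neg (by omega)]
    rw [ih (fun y hy => h y (List.mem_cons_of_mem _ hy))]
    have : (min (x.length : Int) (L + 1)).toNat = x.length := by omega
    rw [this, List.take_length]

-- ---------- alt characterization ----------

theorem alt_of_le (ls : List (List Int)) (maxLen : Int) (h : totalOf ls ≤ maxLen) :
    truncate_lists_alt ls maxLen = ls := by
  simp only [truncate_lists_alt]
  simp only [totalOf] at h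
  rw [if_pos h]
  simp

theorem alt_of_lt (ls : List (List Int)) (maxLen : Int) (h0 : 0 ≤ maxLen)
    (h1 : maxLen < totalOf ls) :
    ∃ L : Int, 0 ≤ L ∧
      totalOf ls - maxLen ≤ bCost (ls.map (fun x => (x.length : Int))) L ∧
      bCost (ls.map (fun x => (x.length : Int))) (L + 1) < totalOf ls - maxLen ∧
      truncate_lists_alt ls maxLen =
        ((chop L ((totalOf ls - maxLen) - bCost (ls.map (fun x => (x.length : Int))) (L + 1))
          ls.reverse).1).reverse := by
  have hlvtot : (ls.map (fun x => (x.length : Int))).sum = totalOf ls := rfl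
  have hnn : ∀ l ∈ ls.map (fun x => (x.length : Int)), 0 ≤ l := by
    intro l hl
    obtain ⟨y, _, rfl⟩ := List.mem_map.mp hl
    exact Int.natCast_nonneg _
  have hne : ls.map (fun x => (x.length : Int)) ≠ [] := by
    intro hc
    have : totalOf ls = 0 := by rw [← hlvtot, hc]; rfl
    omega
  obtain ⟨m, hm⟩ : ∃ m, PySem.List.max? (ls.map (fun x => (x.length : Int))) (fun l => l) = some m := by
    cases hc : PySem.List.max? (ls.map (fun x => (x.length : Int))) (fun l => l) with
    | none => exact absurd ((PySem.List.max?_eq_none_iff _ _).mp hc) hne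
    | some m => exact ⟨m, rfl⟩
  have hmmax := PySem.List.max?_isMax hm
  have hm0 : 0 ≤ m := hnn m (PySem.List.max?_mem hm)
  have hcost0 : totalOf ls - maxLen ≤ bCost (ls.map (fun x => (x.length : Int))) 0 := by
    rw [bCost_zero _ hnn, hlvtot]; omega
  have hs := bSearch_spec (ls.map (fun x => (x.length : Int))) (totalOf ls - maxLen)
    (m - 0).toNat 0 m rfl hm0 hcost0
  have hL1 : bCost (ls.map (fun x => (x.length : Int)))
      (bSearch (ls.map (fun x => (x.length : Int))) (totalOf ls - maxLen) 0 m + 1) <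
      totalOf ls - maxLen := by
    rcases hs.2.2.2 with h | h
    · rw [h]
      have hz : bCost (ls.map (fun x => (x.length : Int))) (m + 1) = 0 :=
        bCost_eq_zero_of_le _ _ (fun l hl => by have := hmmax l hl; simp at this; omega)
      omega
    · exact h
  refine ⟨_, hs.1, hs.2.2.1, hL1, ?_⟩
  simp only [truncate_lists_alt]
  rw [if_neg (by rw [hlvtot]; omega), hm]
  simp only [Option.getD_some, hlvtot]
  rw [fold_eq_chop]
  rfl

-- ---------- aFindId ----------

theorem findId_inv (ls : List (List Int)) : ∀ (k : Nat), 1 ≤ k → k ≤ ls.length →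
    ∃ i : Nat, i < k ∧
      ((List.range k).foldl
        (fun (st : Int × Int) i =>
          if ((ls.getD i []).length : Int) ≥ st.2 then ((i : Int), ((ls.getD i []).length : Int)) else st)
        (-1, -1))
      = ((i : Int), ((ls.getD i []).length : Int)) ∧
      (∀ j < k, ((ls.getD j []).length : Int) ≤ ((ls.getD i []).length : Int)) ∧
      (∀ j, i < j → j < k → ((ls.getD j []).length : Int) < ((ls.getD i []).length : Int)) := by
  intro k
  induction k with
  | zero => omega
  | succ k ihk =>
    intro _ hk
    by_cases hk1 : 1 ≤ k
    · obtain ⟨i, hik, hst, hmax, hstrict⟩ := ihk hk1 (by omega)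
      rw [List.range_succ, List.foldl_append, hst]
      simp only [List.foldl_cons, List.foldl_nil]
      by_cases hc : ((ls.getD k []).length : Int) ≥ ((ls.getD i []).length : Int)
      · rw [if_pos hc]
        refine ⟨k, by omega, rfl, ?_, ?_⟩
        · intro j hj
          by_cases hjk : j = k
          · subst hjk; exact le_refl _
          · exact le_trans (hmax j (by omega)) hc
        · intro j h1 h2; omega
      · rw [if_neg hc]
        refine ⟨i, by omega, rfl, ?_, ?_⟩
        · intro j hj
          by_cases hjk : j = k
          · subst hjk; omega
          · exact hmax j (by omega)
        · intro j h1 h2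
          by_cases hjk : j = k
          · subst hjk; omega
          · exact hstrict j h1 (by omega)
    · have hk0 : k = 0 := by omega
      subst hk0
      refine ⟨0, by omega, ?_, ?_, ?_⟩
      · simp only [Nat.zero_add, List.range_one, List.foldl_cons, List.foldl_nil]
        rw [if_pos (by have := Int.natCast_nonneg (ls.getD 0 []).length; omega)]
      · intro j hj
        have : j = 0 := by omega
        subst this; exact le_refl _
      · intro j h1 h2; omega

theorem findId_decomp (ls : List (List Int)) (h : ls ≠ []) :
    ∃ P x S, ls = P ++ x :: S ∧ (aFindId ls).1.toNat = P.length ∧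
      (∀ y ∈ P, (y.length : Int) ≤ (x.length : Int)) ∧
      (∀ y ∈ S, (y.length : Int) < (x.length : Int)) := by
  have hlen : 1 ≤ ls.length := by
    cases ls with
    | nil => exact absurd rfl h
    | cons a l => simp
  obtain ⟨i, hik, hst, hmax, hstrict⟩ := findId_inv ls ls.length hlen (le_refl _)
  have hgd : ∀ j (hj : j < ls.length), ls.getD j [] = ls[j]'hj := fun j hj => List.getD_eq_getElem ls [] hj
  refine ⟨ls.take i, ls[i]'hik, ls.drop (i + 1), ?_, ?_, ?_, ?_⟩
  · calc ls = ls.take i ++ ls.drop i := (List.take_append_drop i ls).symm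
      _ = ls.take i ++ (ls[i]'hik) :: ls.drop (i + 1) := by rw [List.getElem_cons_drop hik]
  · show (aFindId ls).1.toNat = _
    unfold aFindId
    rw [hst]
    simp only [Int.toNat_natCast, List.length_take]
    omega
  · intro y hy
    obtain ⟨j, hj, rfl⟩ := List.mem_iff_getElem.mp hy
    rw [List.length_take] at hj
    have hjlen : j < ls.length := by omega
    rw [List.getElem_take]
    have := hmax j hjlen
    rw [hgd j hjlen, hgd i hik] at this
    exact this
  · intro y hy
    obtain ⟨j, hj, rfl⟩ := List.mem_iff_getElem.mp hy
    rw [List.length_drop] at hj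
    have hjlen : i + 1 + j < ls.length := by omega
    rw [List.getElem_drop]
    have := hstrict (i + 1 + j) (by omega) hjlen
    rw [hgd _ hjlen, hgd i hik] at this
    exact this

theorem modify_append_cons (P S : List (List Int)) (x : List Int) (f : List Int → List Int) :
    (P ++ x :: S).modify P.length f = P ++ f x :: S := by
  induction P with
  | nil => simp [List.modify]
  | cons p P ih => simpa [List.modify] using ih

theorem totalOf_append_cons (P S : List (List Int)) (x : List Int) :
    totalOf (P ++ x :: S) = totalOf P + (x.length : Int) + totalOf S := by
  simp [totalOf]; ring

-- decomposition of ls around the element A pops, with all the facts the step proof needs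
theorem pop_decomp (ls : List (List Int)) (maxLen : Int) (h0 : 0 ≤ maxLen)
    (h1 : maxLen < totalOf ls) :
    ∃ P x S, ls = P ++ x :: S ∧ x ≠ [] ∧
      ls.modify (aFindId ls).1.toNat List.dropLast = P ++ x.dropLast :: S ∧
      (∀ y ∈ P, (y.length : Int) ≤ (x.length : Int)) ∧
      (∀ y ∈ S, (y.length : Int) < (x.length : Int)) := by
  have hne : ls ≠ [] := by
    intro hc
    have : totalOf ls = 0 := by rw [hc]; rfl
    omega
  obtain ⟨P, x, S, hdec, hid, hP, hS⟩ := findId_decomp ls hne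
  have hx : x ≠ [] := by
    intro hc
    subst hc
    have hle : ∀ y ∈ ls, (y.length : Int) ≤ 0 := by
      intro y hy
      rw [hdec] at hy
      rcases List.mem_append.mp hy with hy | hy
      · simpa using hP y hy
      · rcases List.mem_cons.mp hy with rfl | hy
        · simp
        · have := hS y hy; simp at this; omega
    have : totalOf ls ≤ 0 := by
      have h2 : ∀ l ∈ ls.map (fun x => (x.length : Int)), l ≤ (fun _ => (0:Int)) l := by
        intro l hl
        obtain ⟨y, hy, rfl⟩ := List.mem_map.mp hl
        exact hle y hy
      calc (ls.map (fun x => (x.length : Int))).sum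
          ≤ ((ls.map (fun x => (x.length : Int))).map (fun _ => (0 : Int))).sum := by
            simpa using List.sum_le_sum (l := ls.map (fun x => (x.length : Int)))
              (f := fun l => l) (g := fun _ => (0:Int)) h2
        _ = 0 := by simp [Function.comp_def]
    omega
  exact ⟨P, x, S, hdec, hx, by rw [hid, hdec, modify_append_cons], hP, hS⟩

-- ---------- the step lemma ----------

theorem alt_step (ls : List (List Int)) (maxLen : Int) (h0 : 0 ≤ maxLen)
    (h1 : maxLen < totalOf ls) :
    truncate_lists_alt (ls.modify (aFindId ls).1.toNat List.dropLast) maxLen =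
      truncate_lists_alt ls maxLen := by
  obtain ⟨P, x, S, hdec, hxne, hmod, hP, hS⟩ := pop_decomp ls maxLen h0 h1
  have hM1 : 1 ≤ (x.length : Int) := by
    have : x.length ≠ 0 := fun hc => hxne (List.eq_nil_of_length_eq_zero hc)
    omega
  have hdl : ((x.dropLast).length : Int) = (x.length : Int) - 1 := by
    rw [List.length_dropLast]; omega
  have e1 : totalOf ls = totalOf P + (x.length : Int) + totalOf S := by
    rw [hdec, totalOf_append_cons]
  have htot' : totalOf (ls.modify (aFindId ls).1.toNat List.dropLast) = totalOf ls - 1 := by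
    rw [hmod, totalOf_append_cons, hdl]; omega
  obtain ⟨L, hL0, hLc, hLc1, hform⟩ := alt_of_lt ls maxLen h0 h1
  -- length-list decompositions
  have hlveq : ls.map (fun y => (y.length : Int)) =
      (P.map (fun y => (y.length : Int))) ++ (x.length : Int) :: (S.map (fun y => (y.length : Int))) := by
    rw [hdec]; simp
  have hlveq' : (ls.modify (aFindId ls).1.toNat List.dropLast).map (fun y => (y.length : Int)) =
      (P.map (fun y => (y.length : Int))) ++ ((x.length : Int) - 1) :: (S.map (fun y => (y.length : Int))) := by
    rw [hmod]; simp only [List.map_append, List.map_cons, hdl]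
  have hcost : ∀ t, bCost (ls.map (fun y => (y.length : Int))) t =
      bCost (P.map (fun y => (y.length : Int))) t +
      (if t < (x.length : Int) then (x.length : Int) - t else 0) +
      bCost (S.map (fun y => (y.length : Int))) t := by
    intro t; rw [hlveq, bCost_append, bCost_cons]; ring
  have hcost' : ∀ t, bCost ((ls.modify (aFindId ls).1.toNat List.dropLast).map (fun y => (y.length : Int))) t =
      bCost (P.map (fun y => (y.length : Int))) t +
      (if t < (x.length : Int) - 1 then (x.length : Int) - 1 - t else 0) +
      bCost (S.map (fun y => (y.length : Int))) t := by
    intro t; rw [hlveq', bCost_append, bCost_cons]; ring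
  have hPle : ∀ l ∈ P.map (fun y => (y.length : Int)), l ≤ (x.length : Int) := by
    intro l hl; obtain ⟨y, hy, rfl⟩ := List.mem_map.mp hl; exact hP y hy
  have hSlt : ∀ l ∈ S.map (fun y => (y.length : Int)), l < (x.length : Int) := by
    intro l hl; obtain ⟨y, hy, rfl⟩ := List.mem_map.mp hl; exact hS y hy
  have hMge : L + 1 ≤ (x.length : Int) := by
    by_contra hc
    have hz : bCost (ls.map (fun y => (y.length : Int))) L = 0 := by
      apply bCost_eq_zero_of_le
      intro l hl
      rw [hlveq] at hl
      rcases List.mem_append.mp hl with hl | hl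
      · have := hPle l hl; omega
      · rcases List.mem_cons.mp hl with rfl | hl
        · omega
        · have := hSlt l hl; omega
    omega
  have hrev : ls.reverse = S.reverse ++ x :: P.reverse := by rw [hdec]; simp
  have hrev' : (ls.modify (aFindId ls).1.toNat List.dropLast).reverse =
      S.reverse ++ x.dropLast :: P.reverse := by rw [hmod]; simp
  -- the prefix-equality used for the heads
  have htake : ∀ k : Nat, (k : Int) ≤ (x.length : Int) - 1 → x.dropLast.take k = x.take k := by
    intro k hk
    rw [List.dropLast_eq_take, List.take_take]
    congr 1
    omega
  by_cases hcase : totalOf ls - maxLen = 1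
  · -- last pop: the left side is below the budget, and A pops exactly the list B chops
    rw [alt_of_le _ maxLen (by omega), hform]
    have hz : bCost (ls.map (fun y => (y.length : Int))) (L + 1) = 0 := by
      have := bCost_nonneg (ls.map (fun y => (y.length : Int))) (L + 1)
      omega
    have hallle := all_le_of_bCost_eq_zero _ _ hz
    have hMeq : (x.length : Int) = L + 1 := by
      have hm : (x.length : Int) ∈ ls.map (fun y => (y.length : Int)) := by
        rw [hlveq]; exact List.mem_append.mpr (Or.inr List.mem_cons_self)
      have := hallle _ hm
      omega
    rw [hcase, hz, hrev]
    norm_num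
    rw [chop_append, chop_low L 1 S.reverse (by
      intro y hy; rw [List.mem_reverse] at hy; have := hS y hy; omega)]
    rw [chop]
    rw [if_pos ⟨by omega, by omega⟩]
    rw [chop_nonpos L _ P.reverse (by norm_num) (by
      intro y hy; rw [List.mem_reverse] at hy; have := hP y hy; omega)]
    have hxdl : x.take L.toNat = x.dropLast := by
      rw [List.dropLast_eq_take]; congr 1; omega
    rw [hmod]
    simp [hxdl]
  · -- at least two pops remain
    have hr2 : 2 ≤ totalOf ls - maxLen := by omega
    obtain ⟨L', hL0', hLc', hLc1', hform'⟩ :=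
      alt_of_lt (ls.modify (aFindId ls).1.toNat List.dropLast) maxLen h0 (by omega)
    rw [htot'] at hLc' hLc1' hform'
    by_cases hMgt : L + 1 < (x.length : Int)
    · -- the popped list stays above the cap: level and counter are unchanged
      have c1 : totalOf ls - 1 - maxLen ≤
          bCost ((ls.modify (aFindId ls).1.toNat List.dropLast).map (fun y => (y.length : Int))) L := by
        rw [hcost']
        rw [hcost] at hLc
        split_ifs at * <;> omega
      have c2 : bCost ((ls.modify (aFindId ls).1.toNat List.dropLast).map (fun y => (y.length : Int))) (L + 1) <
          totalOf ls - 1 - maxLen := by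
        rw [hcost']
        rw [hcost] at hLc1
        split_ifs at * <;> omega
      have hLL : L' = L := level_unique _ _ _ _ hLc' hLc1' c1 c2
      rw [hLL] at hform'
      have hext : totalOf ls - 1 - maxLen -
          bCost ((ls.modify (aFindId ls).1.toNat List.dropLast).map (fun y => (y.length : Int))) (L + 1) =
          totalOf ls - maxLen - bCost (ls.map (fun y => (y.length : Int))) (L + 1) := by
        rw [hcost', hcost]
        split_ifs <;> omega
      rw [hform, hform', hext, hrev, hrev', chop_append, chop_append]
      congr 2
      set e1 := (chop L (totalOf ls - maxLen - bCost (ls.map (fun y => (y.length : Int))) (L + 1)) S.reverse).2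
      rw [chop, chop]
      by_cases he : e1 > 0
      · rw [if_pos ⟨by omega, he⟩, if_pos ⟨by omega, he⟩]
        rw [htake L.toNat (by omega)]
      · rw [if_neg (by omega), if_neg (by omega)]
        have m1 : (min ((x.dropLast.length : Nat) : Int) (L + 1)).toNat = (L + 1).toNat := by
          rw [List.length_dropLast]; omega
        have m2 : (min ((x.length : Nat) : Int) (L + 1)).toNat = (L + 1).toNat := by omega
        rw [m1, m2, htake (L + 1).toNat (by omega)]
    · -- the popped list sits exactly at the cap: the counter drops by one
      have hMeq : (x.length : Int) = L + 1 := by omega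
      have hz : bCost (ls.map (fun y => (y.length : Int))) (L + 1) = 0 := by
        apply bCost_eq_zero_of_le
        intro l hl
        rw [hlveq] at hl
        rcases List.mem_append.mp hl with hl | hl
        · have := hPle l hl; omega
        · rcases List.mem_cons.mp hl with rfl | hl
          · omega
          · have := hSlt l hl; omega
      have hz' : bCost ((ls.modify (aFindId ls).1.toNat List.dropLast).map (fun y => (y.length : Int))) (L + 1) = 0 := by
        apply bCost_eq_zero_of_le
        intro l hl
        rw [hlveq'] at hl
        rcases List.mem_append.mp hl with hl | hl
        · have := hPle l hl; omega
        · rcases List.mem_cons.mp hl with rfl | hl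
          · omega
          · have := hSlt l hl; omega
      have c1 : totalOf ls - 1 - maxLen ≤
          bCost ((ls.modify (aFindId ls).1.toNat List.dropLast).map (fun y => (y.length : Int))) L := by
        rw [hcost']
        rw [hcost] at hLc
        split_ifs at * <;> omega
      have hLL : L' = L := level_unique _ _ _ _ hLc' hLc1' c1 (by omega)
      rw [hLL] at hform'
      have hSlow : ∀ y ∈ S.reverse, (y.length : Int) < L + 1 := by
        intro y hy; rw [List.mem_reverse] at hy; have := hS y hy; omega
      have hxdl : x.take L.toNat = x.dropLast := by
        rw [List.dropLast_eq_take]; congr 1; omega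
      have hxdl2 : x.dropLast.take (min ((x.dropLast.length : Int)) (L + 1)).toNat = x.dropLast := by
        have hm : (min ((x.dropLast.length : Int)) (L + 1)).toNat = x.dropLast.length := by
          omega
        rw [hm, List.take_length]
      have lhsEq : (chop L (totalOf ls - 1 - maxLen - 0) (S.reverse ++ x.dropLast :: P.reverse)).1
          = S.reverse ++ x.dropLast :: (chop L (totalOf ls - 1 - maxLen - 0) P.reverse).1 := by
        rw [chop_append, chop_low L _ S.reverse hSlow]
        dsimp only
        rw [chop]
        rw [if_neg (by
          intro hcontra
          have hc1 := hcontra.1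
          omega)]
        dsimp only
        rw [hxdl2]
      have rhsEq : (chop L (totalOf ls - maxLen - 0) (S.reverse ++ x :: P.reverse)).1
          = S.reverse ++ x.dropLast :: (chop L (totalOf ls - maxLen - 0 - 1) P.reverse).1 := by
        rw [chop_append, chop_low L _ S.reverse hSlow]
        dsimp only
        rw [chop, if_pos ⟨by omega, by omega⟩]
        dsimp only
        rw [hxdl]
      rw [hform, hform', hz, hz', hrev, hrev', lhsEq, rhsEq]
      have hAB : totalOf ls - 1 - maxLen - 0 = totalOf ls - maxLen - 0 - 1 := by ring
      rw [hAB]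

-- ---------- main induction ----------

theorem loop_eq (maxLen : Int) (h0 : 0 ≤ maxLen) : ∀ (n : Nat) (ls : List (List Int)),
    (totalOf ls - maxLen).toNat = n →
    truncateLoop ls (totalOf ls) maxLen = truncate_lists_alt ls maxLen := by
  intro n
  induction n using Nat.strong_induction_on with
  | _ n ih =>
    intro ls hn
    rw [truncateLoop]
    by_cases h : totalOf ls > maxLen
    · rw [if_pos h]
      obtain ⟨P, x, S, hdec, hxne, hmod, _, _⟩ := pop_decomp ls maxLen h0 h
      have hx1 : 1 ≤ (x.length : Int) := by
        have : x.length ≠ 0 := fun hc => hxne (List.eq_nil_of_length_eq_zero hc)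
        omega
      have htot' : totalOf (ls.modify (aFindId ls).1.toNat List.dropLast) = totalOf ls - 1 := by
        rw [hmod, hdec, totalOf_append_cons, totalOf_append_cons]
        have : ((x.dropLast).length : Int) = (x.length : Int) - 1 := by
          rw [List.length_dropLast]; omega
        omega
      rw [show totalOf ls - 1 = totalOf (ls.modify (aFindId ls).1.toNat List.dropLast) from by omega]
      rw [ih (totalOf (ls.modify (aFindId ls).1.toNat List.dropLast) - maxLen).toNat
        (by omega) _ rfl]
      exact alt_step ls maxLen h0 h
    · rw [if_neg h]
      exact (alt_of_le ls maxLen (by omega)).symm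

-- ===== VERDICT (by name: the statement is the Claim_ definition above) =====
theorem truncate_lists_spec : Claim_equal_truncate_lists := by
  intro ls maxLen _ hpre
  unfold Spec_truncate_lists truncate_lists
  exact loop_eq maxLen hpre (totalOf ls - maxLen).toNat ls rfl
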